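-- pv_equiv track=rewrite | github.com/OliverLeeyiyang/Learn-Python-from-abc | 2_Function/Answer/extension.py | is_meal_deal_eligible
-- ===== SOURCE A (Python) =====
-- def is_meal_deal_eligible(items):
--     """
--     Check if the items qualify for a meal deal.
--     A meal deal requires at least one main item, one side, and one drink.
--
--     Args:
--         items (list): List of item names
--
--     Returns:
--         bool: True if eligible for a meal deal, False otherwise
--     """
--     main_items = ["Big Mac", "Quarter Pounder", "McChicken", "Filet-O-Fish"]
--     sides = ["French Fries", "Apple Slices", "Side Salad"]
--     drinks = ["Coke", "Sprite", "Diet Coke", "Water", "Coffee"]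
--
--     has_main = any(item in main_items for item in items)
--     has_side = any(item in sides for item in items)
--     has_drink = any(item in drinks for item in items)
--
--     return has_main and has_side and has_drink
-- ===== SOURCE B (Python) =====
-- def is_meal_deal_eligible(items):
--     """Single pass over items maintaining three flags, with early exit once all are set."""
--     main_items = ["Big Mac", "Quarter Pounder", "McChicken", "Filet-O-Fish"]
--     sides = ["French Fries", "Apple Slices", "Side Salad"]
--     drinks = ["Coke", "Sprite", "Diet Coke", "Water", "Coffee"]
--
--     has_main = has_side = has_drink = False
--     for item in items:
--         if item in main_items:
--             has_main = True
--         if item in sides: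
--             has_side = True
--         if item in drinks:
--             has_drink = True
--         if has_main and has_side and has_drink:
--             return True
--     return False
-- ===== Notes on version B (the rewrite author's own statement) =====
-- stated objective: alternative
-- what changed: Replaced three separate any() scans of the item list (one per category) by a single loop that maintains three boolean flags and returns True early as soon as all three categories are seen.
import Mathlib
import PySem

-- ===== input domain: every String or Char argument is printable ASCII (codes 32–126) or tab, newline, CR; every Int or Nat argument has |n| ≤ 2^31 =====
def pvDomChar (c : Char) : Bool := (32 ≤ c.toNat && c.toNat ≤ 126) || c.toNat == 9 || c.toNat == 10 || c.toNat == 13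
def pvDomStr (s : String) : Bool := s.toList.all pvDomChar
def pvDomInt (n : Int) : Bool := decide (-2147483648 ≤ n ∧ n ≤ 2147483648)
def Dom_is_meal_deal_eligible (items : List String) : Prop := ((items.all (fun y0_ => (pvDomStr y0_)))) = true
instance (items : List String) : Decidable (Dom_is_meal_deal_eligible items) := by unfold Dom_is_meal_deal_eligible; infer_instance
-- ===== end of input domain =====

-- B replaces A's three any() scans with one flag-carrying loop with early exit; objective: alternative (same result, one pass).
-- ===== PORT A =====
def pvMainItems : List String := ["Big Mac", "Quarter Pounder", "McChicken", "Filet-O-Fish"]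
def pvSides : List String := ["French Fries", "Apple Slices", "Side Salad"]
def pvDrinks : List String := ["Coke", "Sprite", "Diet Coke", "Water", "Coffee"]

def is_meal_deal_eligible (items : List String) : Bool :=
  let has_main := items.any (fun item => pvMainItems.contains item)
  let has_side := items.any (fun item => pvSides.contains item)
  let has_drink := items.any (fun item => pvDrinks.contains item)
  has_main && has_side && has_drink

-- ===== PORT B =====
def pvAltLoop : List String → Bool → Bool → Bool → Bool
  | [], m, s, d => m && s && d
  | item :: rest, m, s, d =>
    let m := if pvMainItems.contains item then true else m
    let s := if pvSides.contains item then true else s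
    let d := if pvDrinks.contains item then true else d
    if m && s && d then true else pvAltLoop rest m s d

def is_meal_deal_eligible_alt (items : List String) : Bool :=
  pvAltLoop items false false false

-- ===== PRECONDITION & SPEC =====
def Spec_is_meal_deal_eligible (items : List String) (out : Bool) : Prop := out = is_meal_deal_eligible_alt items
instance (items : List String) (out : Bool) : Decidable (Spec_is_meal_deal_eligible items out) := by unfold Spec_is_meal_deal_eligible; infer_instance

-- ===== CLAIM (what is proved, stated in full; the proofs are below) =====
def Claim_equal_is_meal_deal_eligible : Prop := ∀ (items : List String), Dom_is_meal_deal_eligible items → Spec_is_meal_deal_eligible items (is_meal_deal_eligible items)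

-- ===== LEMMAS AND PROOFS =====

-- ===== VERDICT (by name: the statement is the Claim_ definition above) =====
-- Loop invariant: pvAltLoop computes the three-scan conjunction with accumulated flags.
theorem pvAltLoop_eq (l : List String) : ∀ m s d : Bool,
    pvAltLoop l m s d =
      ((m || l.any (fun i => pvMainItems.contains i)) &&
       (s || l.any (fun i => pvSides.contains i)) &&
       (d || l.any (fun i => pvDrinks.contains i))) := by
  induction l with
  | nil => intro m s d; simp [pvAltLoop]
  | cons x t ih =>
    intro m s d
    simp only [pvAltLoop]
    by_cases hm : x ∈ pvMainItems <;> by_cases hs : x ∈ pvSides <;>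
      by_cases hd : x ∈ pvDrinks <;> cases m <;> cases s <;> cases d <;>
        simp [ih, hm, hs, hd]

theorem is_meal_deal_eligible_spec : Claim_equal_is_meal_deal_eligible := by
  intro items _
  unfold Spec_is_meal_deal_eligible is_meal_deal_eligible is_meal_deal_eligible_alt
  simp [pvAltLoop_eq]
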